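-- pv_equiv track=rewrite | github.com/sarishtshreshth0/plag_extract | Project_CodeNet_Python800/p03212/s877179033.py | calc
-- ===== SOURCE A (Python) =====
-- def calc(n):
--   dic={0:0,1:3,2:5,3:7}
--   ret=0
--   for j in range(9):
--     ret+=dic[n%4]*(10**j)
--     n-=n%4
--     n//=4
--     if n==0:
--       return ret
-- ===== SOURCE B (Python) =====
-- def calc(n):
--     # calc(n) is the n-th smallest nonnegative integer whose decimal digits
--     # all lie in {0, 3, 5, 7}: count up n times in that digit system.
--     m = 0
--     for _ in range(n):
--         m = _succ(m)
--     return m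
--
-- def _succ(m):
--     # smallest number > m whose decimal digits all lie in {0, 3, 5, 7}
--     # (assuming m's own digits already do)
--     q, d = divmod(m, 10)
--     if d == 0:
--         return q * 10 + 3
--     if d == 3:
--         return q * 10 + 5
--     if d == 5:
--         return q * 10 + 7
--     return _succ(q) * 10  # d == 7: carry into the next decimal digit
-- ===== Notes on version B (the rewrite author's own statement) =====
-- stated objective: alternative
-- what changed: A converts n to base 4 and maps each digit through {0:0,1:3,2:5,3:7} into a decimal accumulator; B never looks at n's base-4 digits at all: it counts up from 0, applying n times a successor function on the decimal digit system {0,3,5,7}, since calc(n) is exactly the n-th smallest nonnegative integer whose decimal digits all lie in {0,3,5,7}.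
-- outside the precondition, e.g. on calc(-1): A returns None, B returns 0; on calc(262144): A returns None, B returns 3000000000
import Mathlib
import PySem

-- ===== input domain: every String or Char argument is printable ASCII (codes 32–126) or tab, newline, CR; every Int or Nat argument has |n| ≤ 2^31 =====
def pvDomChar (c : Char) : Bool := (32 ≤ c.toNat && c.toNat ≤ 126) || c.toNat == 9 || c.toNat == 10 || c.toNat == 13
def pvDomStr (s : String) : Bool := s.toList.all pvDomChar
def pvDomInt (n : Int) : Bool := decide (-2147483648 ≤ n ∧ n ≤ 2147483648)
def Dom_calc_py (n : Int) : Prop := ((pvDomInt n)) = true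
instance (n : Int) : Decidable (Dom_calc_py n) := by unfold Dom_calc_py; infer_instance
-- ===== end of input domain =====

-- B is a different algorithm: instead of converting n to base 4 and mapping digits,
-- it counts up from 0, applying n times a successor function in the decimal digit
-- system {0,3,5,7} (calc(n) is the n-th such number). A mutates nothing.

-- ===== PORT A =====
def calcA_dic : PySem.Dict Int Int := PySem.Dict.ofList [(0, 0), (1, 3), (2, 5), (3, 7)]

-- the 'for j in range(9)' loop; fuel = remaining iterations; returning at fuel 0 is
-- Python's fall-off-the-loop 'return None' — unreachable under Pre_calc_py
def calcA_loop : Nat → Nat → Int → Int → Int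
  | 0, _, _, ret => ret
  | f + 1, j, n, ret =>
      -- dic[n%4]: the key 0 ≤ n%4 < 4 is always present, so .getD 0 never fires its default
      let ret' := ret + (calcA_dic.get? (PySem.Int.mod n 4)).getD 0 * 10 ^ j
      let n' := PySem.Int.floordiv (n - PySem.Int.mod n 4) 4
      if n' = 0 then ret' else calcA_loop f (j + 1) n' ret'

def calc_py (n : Int) : Int := calcA_loop 9 0 n 0

-- ===== PORT B =====
-- _succ: next number whose decimal digits all lie in {0,3,5,7}.
-- The 'm ≤ 0' guard only makes the recursion total: for m = 0 it returns exactly the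
-- d == 0 branch's value (divmod(0,10) = (0,0) → 0*10+3 = 3); negative m never occurs
-- (B applies _succ only to values reached from 0).
def calcB_succ (m : Int) : Int :=
  if m ≤ 0 then 3
  else
    let q := PySem.Int.floordiv m 10
    let d := PySem.Int.mod m 10
    if d = 0 then q * 10 + 3
    else if d = 3 then q * 10 + 5
    else if d = 5 then q * 10 + 7
    else calcB_succ q * 10  -- d == 7: carry into the next decimal digit
termination_by m.toNat
decreasing_by
  rw [PySem.Int.floordiv_eq_ediv_of_pos (by norm_num)]
  omega

-- 'for _ in range(n): m = _succ(m)' — range(n) has n.toNat iterations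
def calcB_iter : Nat → Int → Int
  | 0, m => m
  | k + 1, m => calcB_iter k (calcB_succ m)

def calc_py_alt (n : Int) : Int := calcB_iter n.toNat 0

-- ===== PRECONDITION & SPEC =====
-- Pre_ excludes n < 0 and n ≥ 4^9: there A's 9-iteration loop never reaches n == 0 and
-- falls off, returning None, which is not a value of the declared Int return type.
def Pre_calc_py (n : Int) : Prop := 0 ≤ n ∧ n < 4 ^ 9
instance (n : Int) : Decidable (Pre_calc_py n) := by unfold Pre_calc_py; infer_instance
def pvWitness_calc_py : Int := 5

def Spec_calc_py (n : Int) (out : Int) : Prop := out = calc_py_alt n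
instance (n : Int) (out : Int) : Decidable (Spec_calc_py n out) := by unfold Spec_calc_py; infer_instance

-- ===== CLAIM (what is proved, stated in full; the proofs are below) =====
def Claim_equal_calc_py : Prop := ∀ (n : Int), Dom_calc_py n → Pre_calc_py n → Spec_calc_py n (calc_py n)

-- ===== LEMMAS AND PROOFS =====

-- reference function: the value both programs compute, as a recursion on Nat
def mapD (r : Nat) : Int := if r = 0 then 0 else if r = 1 then 3 else if r = 2 then 5 else 7

def fRef (t : Nat) : Int :=
  if h : t = 0 then 0 else fRef (t / 4) * 10 + mapD (t % 4)
termination_by t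
decreasing_by exact Nat.div_lt_self (Nat.pos_of_ne_zero h) (by omega)

lemma mapD_nonneg (r : Nat) : 0 ≤ mapD r := by unfold mapD; split_ifs <;> norm_num

lemma mapD_lt (r : Nat) : mapD r < 10 := by unfold mapD; split_ifs <;> norm_num

lemma fRef_nonneg (t : Nat) : 0 ≤ fRef t := by
  induction t using Nat.strong_induction_on with
  | _ t ih =>
    rw [fRef]
    split_ifs with h
    · norm_num
    · have h1 := ih (t / 4) (Nat.div_lt_self (Nat.pos_of_ne_zero h) (by omega))
      have h2 := mapD_nonneg (t % 4)
      nlinarith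

lemma fRef_pos (t : Nat) (ht : 0 < t) : 0 < fRef t := by
  induction t using Nat.strong_induction_on with
  | _ t ih =>
    rw [fRef]
    split_ifs with h
    · omega
    · have h1 := fRef_nonneg (t / 4)
      by_cases hr : t % 4 = 0
      · have h4 : 0 < t / 4 := by omega
        have := ih (t / 4) (Nat.div_lt_self (Nat.pos_of_ne_zero h) (by omega)) h4
        have := mapD_nonneg (t % 4)
        nlinarith
      · have : 3 ≤ mapD (t % 4) := by unfold mapD; split_ifs <;> omega
        nlinarith

-- decimal divmod of fRef t
lemma fRef_div10 (t : Nat) : fRef t / 10 = fRef (t / 4) ∧ fRef t % 10 = mapD (t % 4) := by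
  rw [fRef]
  split_ifs with h
  · subst h; simp [fRef, mapD]
  · have h1 := fRef_nonneg (t / 4)
    have h2 := mapD_nonneg (t % 4)
    have h3 := mapD_lt (t % 4)
    omega

-- small inputs
lemma fRef_small (t : Nat) (h : t < 4) : fRef t = mapD (t % 4) := by
  rw [fRef]
  split_ifs with h0
  · subst h0; simp [mapD]
  · rw [show t / 4 = 0 from by omega, fRef]; norm_num

-- key lemma: B's successor advances the reference value by one
lemma succ_fRef (t : Nat) : calcB_succ (fRef t) = fRef (t + 1) := by
  induction t using Nat.strong_induction_on with
  | _ t ih =>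
    by_cases h0 : t = 0
    · subst h0
      have h1 : fRef 0 = 0 := by rw [fRef]; simp
      have h2 : fRef 1 = 3 := by rw [fRef]; simp [h1, mapD]
      rw [h1, h2, calcB_succ]; norm_num
    · have hpos := fRef_pos t (Nat.pos_of_ne_zero h0)
      obtain ⟨hq, hd⟩ := fRef_div10 t
      rw [calcB_succ, if_neg (by omega)]
      simp only [PySem.Int.floordiv_eq_ediv_of_pos (show (0:Int) < 10 by norm_num),
        PySem.Int.mod_eq_emod_of_pos (show (0:Int) < 10 by norm_num), hq, hd]
      have hr4 : t % 4 < 4 := Nat.mod_lt _ (by omega)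
      interval_cases hr : t % 4
      · -- t % 4 = 0, t > 0, so t ≥ 4; t+1 has last digit 1 ↦ 3
        rw [show mapD 0 = 0 from rfl]; norm_num
        conv_rhs => rw [fRef]
        rw [dif_neg (show ¬ t + 1 = 0 from by omega),
            show (t + 1) / 4 = t / 4 from by omega,
            show (t + 1) % 4 = 1 from by omega]
        simp [mapD]
      · rw [show mapD 1 = 3 from rfl]; norm_num
        conv_rhs => rw [fRef]
        rw [dif_neg (show ¬ t + 1 = 0 from by omega),
            show (t + 1) / 4 = t / 4 from by omega,
            show (t + 1) % 4 = 2 from by omega]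
        simp [mapD]
      · rw [show mapD 2 = 5 from rfl]; norm_num
        conv_rhs => rw [fRef]
        rw [dif_neg (show ¬ t + 1 = 0 from by omega),
            show (t + 1) / 4 = t / 4 from by omega,
            show (t + 1) % 4 = 3 from by omega]
        simp [mapD]
      · -- t % 4 = 3: carry
        rw [show mapD 3 = 7 from rfl]; norm_num
        rw [ih (t / 4) (Nat.div_lt_self (by omega) (by omega))]
        conv_rhs => rw [fRef]
        rw [dif_neg (show ¬ t + 1 = 0 from by omega),
            show (t + 1) / 4 = t / 4 + 1 from by omega,
            show (t + 1) % 4 = 0 from by omega]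
        simp [mapD]

lemma iter_fRef (k : Nat) : ∀ (j : Nat), calcB_iter k (fRef j) = fRef (j + k) := by
  induction k with
  | zero => intro j; simp [calcB_iter]
  | succ k ih =>
    intro j
    rw [calcB_iter, succ_fRef, ih (j + 1)]
    congr 1
    omega

lemma alt_eq_fRef (n : Int) : calc_py_alt n = fRef n.toNat := by
  unfold calc_py_alt
  have h0 : fRef 0 = 0 := by rw [fRef]; norm_num
  rw [← h0, iter_fRef n.toNat 0, Nat.zero_add]

-- A's dict lookup equals mapD on the (always present) key n % 4
lemma dic_eq_mapD (n : Int) (hn : 0 ≤ n) :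
    (calcA_dic.get? (PySem.Int.mod n 4)).getD 0 = mapD (n.toNat % 4) := by
  have he : PySem.Int.mod n 4 = ((n.toNat % 4 : Nat) : Int) := by
    rw [PySem.Int.mod_eq_emod_of_pos (by norm_num)]
    omega
  have h4 : n.toNat % 4 < 4 := Nat.mod_lt _ (by omega)
  interval_cases h : n.toNat % 4 <;> rw [he] <;> decide

-- A's update n -= n%4; n //= 4 is Euclidean division by 4
lemma stepA_eq_ediv (n : Int) :
    PySem.Int.floordiv (n - PySem.Int.mod n 4) 4 = n / 4 := by
  rw [PySem.Int.mod_eq_emod_of_pos (by norm_num),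
      PySem.Int.floordiv_eq_ediv_of_pos (by norm_num)]
  omega

-- loop invariant: with enough fuel, A's loop adds 10^j times the reference value
lemma loopA_eq (fuel : Nat) :
    ∀ (j : Nat) (n ret : Int), 0 ≤ n → n < 4 ^ fuel → 1 ≤ fuel →
      calcA_loop fuel j n ret = ret + 10 ^ j * fRef n.toNat := by
  induction fuel with
  | zero => intro _ _ _ _ _ hf; omega
  | succ f ih =>
    intro j n ret hn hub _
    rw [calcA_loop]
    simp only [stepA_eq_ediv, dic_eq_mapD n hn]
    by_cases hz : n / 4 = 0
    · rw [if_pos hz]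
      have hlt : n.toNat < 4 := by omega
      rw [fRef_small n.toNat hlt]; ring
    · rw [if_neg hz]
      have hn4 : 4 ≤ n := by omega
      have hub' : n < 4 * 4 ^ f := by rw [pow_succ, mul_comm] at hub; exact hub
      have hf1 : 1 ≤ f := by
        rcases Nat.eq_zero_or_pos f with h | h
        · subst h; norm_num at hub'; omega
        · exact h
      rw [ih (j + 1) (n / 4) _ (by omega) (by omega) hf1]
      have htn : (n / 4).toNat = n.toNat / 4 := by omega
      have hsplit : fRef n.toNat = fRef (n.toNat / 4) * 10 + mapD (n.toNat % 4) := by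
        rw [fRef, dif_neg (show ¬ n.toNat = 0 from by omega)]
      rw [htn, hsplit]
      ring

-- ===== VERDICT (by name: the statement is the Claim_ definition above) =====
theorem calc_py_spec : Claim_equal_calc_py := by
  intro n _ hpre
  unfold Spec_calc_py calc_py
  obtain ⟨h0, h1⟩ := hpre
  rw [loopA_eq 9 0 n 0 h0 (by norm_num; omega) (by norm_num), alt_eq_fRef]
  ring
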